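-- pv_equiv track=rewrite | github.com/august-hw2/24_Programmers_Python_Basics | 프로그래머스/0/181902. 문자 개수 세기/문자 개수 세기.py | solution
-- ===== SOURCE A (Python) =====
-- def solution(my_string):
--     if 1<=len(my_string)<=1000 and my_string.isalpha():
--
--         res = [0] * 52
--
--         for i in range(len(my_string)):
--             if 65 <= ord(my_string[i]) <= 90: #대문자
--                 res[ord(my_string[i]) - 65] += 1
--             elif 97 <= ord(my_string[i]) <= 122: #소문자
--                 res[ord(my_string[i]) - 71] += 1
--
--         return res
--
--     else:
--         return -1
-- ===== SOURCE B (Python) =====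
-- def solution(my_string):
--     if 1 <= len(my_string) <= 1000 and my_string.isalpha():
--         letters = [chr(i) for i in range(65, 91)] + [chr(i) for i in range(97, 123)]
--         return [my_string.count(ch) for ch in letters]
--     return -1
-- ===== Notes on version B (the rewrite author's own statement) =====
-- stated objective: idiomatic
-- what changed: A makes one pass over the string dispatching each character into a 52-slot array by ord arithmetic; B instead builds the 52 target letters (A-Z then a-z) and produces each slot with a per-letter my_string.count scan, so the array is a comprehension over letters rather than an in-place index-update loop.
-- outside the precondition, e.g. on solution('a1'): A returns -1, B returns -1
import Mathlib
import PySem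

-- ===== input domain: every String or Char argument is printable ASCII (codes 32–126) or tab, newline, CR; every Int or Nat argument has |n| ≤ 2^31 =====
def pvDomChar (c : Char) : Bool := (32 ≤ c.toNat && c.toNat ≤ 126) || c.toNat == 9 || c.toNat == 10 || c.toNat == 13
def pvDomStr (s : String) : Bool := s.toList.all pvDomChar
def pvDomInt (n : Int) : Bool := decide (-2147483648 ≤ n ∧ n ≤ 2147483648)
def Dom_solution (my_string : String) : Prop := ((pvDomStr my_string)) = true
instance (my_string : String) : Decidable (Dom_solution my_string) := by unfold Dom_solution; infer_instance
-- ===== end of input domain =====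

-- B replaces A's single ord-dispatch pass over the string with a per-letter count over the
-- 52 target letters (same guard, same result); objective: idiomatic, not faster.


-- ===== PORT A =====
-- 'for i in range(len(my_string))' only reads my_string[i], i.e. it visits the characters in
-- order: ported as a fold over the character list; ord(c) is c.toNat (exact on ASCII).
def solution (my_string : String) : List Int :=
  if 1 ≤ PySem.Str.len my_string ∧ PySem.Str.len my_string ≤ 1000 ∧
      PySem.Str.strIsalpha my_string = true then
    my_string.toList.foldl (fun res c =>
      if 65 ≤ c.toNat ∧ c.toNat ≤ 90 then
        res.modify (c.toNat - 65) (· + 1)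
      else if 97 ≤ c.toNat ∧ c.toNat ≤ 122 then
        res.modify (c.toNat - 71) (· + 1)
      else res) (List.replicate 52 (0 : Int))
  else []  -- Python returns -1 here, an int and not a list: excluded by Pre_solution

-- ===== PORT B =====
-- [chr(i) for i in range(65, 91)] + [chr(i) for i in range(97, 123)]; chr(i) is Char.ofNat
-- (exact for these non-negative ASCII code points).
def pyLetters : List Char :=
  ((PySem.List.pyRange 65 91 1).map (fun i => Char.ofNat i.toNat)) ++
  ((PySem.List.pyRange 97 123 1).map (fun i => Char.ofNat i.toNat))

def solution_alt (my_string : String) : List Int :=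
  if 1 ≤ PySem.Str.len my_string ∧ PySem.Str.len my_string ≤ 1000 ∧
      PySem.Str.strIsalpha my_string = true then
    pyLetters.map (fun ch => (PySem.Str.count my_string (String.ofList [ch]) : Int))
  else []  -- Python returns -1 here, an int and not a list: excluded by Pre_solution

-- ===== PRECONDITION & SPEC =====
-- Pre_ excludes exactly the inputs on which A takes its else-branch and returns the int -1,
-- which is not a value of the declared List Int type (B returns -1 there too).
def Pre_solution (my_string : String) : Prop :=
  1 ≤ PySem.Str.len my_string ∧ PySem.Str.len my_string ≤ 1000 ∧
    PySem.Str.strIsalpha my_string = true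
instance (my_string : String) : Decidable (Pre_solution my_string) := by
  unfold Pre_solution; infer_instance
def pvWitness_solution : String := "aZb"

def Spec_solution (my_string : String) (out : List Int) : Prop := out = solution_alt my_string
instance (my_string : String) (out : List Int) : Decidable (Spec_solution my_string out) := by
  unfold Spec_solution; infer_instance

-- ===== CLAIM (what is proved, stated in full; the proofs are below) =====
def Claim_equal_solution : Prop :=
  ∀ (my_string : String), Dom_solution my_string → Pre_solution my_string →
    Spec_solution my_string (solution my_string)

-- ===== LEMMAS AND PROOFS =====

-- the slot A's dispatch sends an alphabetic character to
def slot (c : Char) : Nat :=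
  if 65 ≤ c.toNat ∧ c.toNat ≤ 90 then c.toNat - 65 else c.toNat - 71

-- A's loop body
def stepA (res : List Int) (c : Char) : List Int :=
  if 65 ≤ c.toNat ∧ c.toNat ≤ 90 then res.modify (c.toNat - 65) (· + 1)
  else if 97 ≤ c.toNat ∧ c.toNat ≤ 122 then res.modify (c.toNat - 71) (· + 1)
  else res

lemma length_stepA (res : List Int) (c : Char) : (stepA res c).length = res.length := by
  unfold stepA; split_ifs <;> simp

lemma length_foldl_stepA (cs : List Char) (res : List Int) :
    (cs.foldl stepA res).length = res.length := by
  induction cs generalizing res with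
  | nil => rfl
  | cons c t ih => simp [List.foldl_cons, ih, length_stepA]

lemma isalpha_ranges (c : Char) (h : PySem.Chars.isalpha c = true) :
    (65 ≤ c.toNat ∧ c.toNat ≤ 90) ∨ (97 ≤ c.toNat ∧ c.toNat ≤ 122) := by
  simp only [PySem.Chars.isalpha, PySem.Chars.isupper, PySem.Chars.islower, Bool.or_eq_true,
    decide_eq_true_eq, Bool.and_eq_true, Char.le_def, UInt32.le_iff_toNat_le] at h
  simp only [Char.toNat]
  exact h

lemma getD_modify_of_lt (res : List Int) (j : Nat) (hj : j < res.length)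
    (i : Nat) (f : Int → Int) :
    (res.modify i f).getD j 0 = if i = j then f (res.getD j 0) else res.getD j 0 := by
  rw [List.getD_eq_getElem?_getD, List.getD_eq_getElem?_getD, List.getElem?_modify,
    List.getElem?_eq_getElem hj]
  split_ifs <;> simp

lemma foldl_stepA_getD (cs : List Char) (halpha : ∀ c ∈ cs, PySem.Chars.isalpha c = true) :
    ∀ (res : List Int) (j : Nat), j < res.length →
      (cs.foldl stepA res).getD j 0 =
        res.getD j 0 + (cs.countP (fun c => slot c == j) : Int) := by
  induction cs with
  | nil => intro res j _; simp
  | cons c t ih =>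
    intro res j hj
    have hc : PySem.Chars.isalpha c = true := halpha c (by simp)
    have ht : ∀ x ∈ t, PySem.Chars.isalpha x = true := fun x hx => halpha x (by simp [hx])
    have hj' : j < (stepA res c).length := by rw [length_stepA]; exact hj
    rw [List.foldl_cons, ih ht (stepA res c) j hj']
    have hstep : (stepA res c).getD j 0 = res.getD j 0 + (if slot c = j then 1 else 0) := by
      rcases isalpha_ranges c hc with hu | hl
      · have he : stepA res c = res.modify (c.toNat - 65) (· + 1) := by
          unfold stepA; rw [if_pos hu]
        have hs : slot c = c.toNat - 65 := by unfold slot; rw [if_pos hu]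
        rw [he, getD_modify_of_lt res j hj, hs]
        split_ifs <;> simp
      · have hnu : ¬ (65 ≤ c.toNat ∧ c.toNat ≤ 90) := by omega
        have he : stepA res c = res.modify (c.toNat - 71) (· + 1) := by
          unfold stepA; rw [if_neg hnu, if_pos hl]
        have hs : slot c = c.toNat - 71 := by unfold slot; rw [if_neg hnu]
        rw [he, getD_modify_of_lt res j hj, hs]
        split_ifs <;> simp
    rw [hstep, List.countP_cons]
    by_cases h : slot c = j <;> simp [h] <;> ring

lemma letters_length : pyLetters.length = 52 := by decide

lemma letters_getD_upper (n : Nat) (h1 : 65 ≤ n) (h2 : n ≤ 90) :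
    pyLetters.getD (n - 65) 'A' = Char.ofNat n := by
  interval_cases n <;> decide

lemma letters_getD_lower (n : Nat) (h1 : 97 ≤ n) (h2 : n ≤ 122) :
    pyLetters.getD (n - 71) 'A' = Char.ofNat n := by
  interval_cases n <;> decide

lemma letters_slot_all :
    (List.range 52).all (fun j => slot (pyLetters.getD j 'A') == j) = true := by decide

lemma slot_letters (j : Nat) (hj : j < 52) : slot (pyLetters.getD j 'A') = j := by
  have := letters_slot_all
  simp only [List.all_eq_true, List.mem_range, beq_iff_eq] at this
  exact this j hj

lemma letters_slot_self (c : Char) (h : PySem.Chars.isalpha c = true) :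
    pyLetters.getD (slot c) 'A' = c := by
  rcases isalpha_ranges c h with hu | hl
  · have : slot c = c.toNat - 65 := by unfold slot; rw [if_pos hu]
    rw [this, letters_getD_upper c.toNat hu.1 hu.2, Char.ofNat_toNat]
  · have hnu : ¬ (65 ≤ c.toNat ∧ c.toNat ≤ 90) := by omega
    have : slot c = c.toNat - 71 := by unfold slot; rw [if_neg hnu]
    rw [this, letters_getD_lower c.toNat hl.1 hl.2, Char.ofNat_toNat]

-- for an alphabetic c and j < 52, landing in slot j is the same as being letter j
lemma slot_eq_iff (c : Char) (h : PySem.Chars.isalpha c = true) (j : Nat) (hj : j < 52) :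
    (slot c == j) = (c == pyLetters.getD j 'A') := by
  by_cases hcj : slot c = j
  · subst hcj
    rw [letters_slot_self c h]
    simp
  · have hne : c ≠ pyLetters.getD j 'A' := by
      intro hce
      exact hcj (by rw [hce]; exact slot_letters j hj)
    have h1 : (slot c == j) = false := by simpa using hcj
    have h2 : (c == pyLetters.getD j 'A') = false := by simpa using hne
    rw [h1, h2]

-- the non-overlapping substring scan of s.count(c), specialised to a single character
lemma count_go_one (c : Char) : ∀ (fuel : Nat) (l : List Char) (acc : Nat),
    l.length ≤ fuel → PySem.Chars.count.go [c] fuel l acc = acc + l.count c := by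
  intro fuel
  induction fuel with
  | zero =>
    intro l acc h
    have : l = [] := List.eq_nil_of_length_eq_zero (Nat.le_zero.mp h)
    subst this; rfl
  | succ n ih =>
    intro l acc h
    cases l with
    | nil => rfl
    | cons a t =>
      show (if [c].isPrefixOf (a :: t) = true then
              PySem.Chars.count.go [c] n (List.drop 1 (a :: t)) (acc + 1)
            else PySem.Chars.count.go [c] n t acc) = acc + (a :: t).count c
      have hlen : t.length ≤ n := by simpa using h
      by_cases hac : c = a
      · subst hac
        have hpre : [c].isPrefixOf (c :: t) = true := by simp [List.isPrefixOf]
        rw [if_pos hpre]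
        show PySem.Chars.count.go [c] n t (acc + 1) = acc + (c :: t).count c
        rw [ih t (acc + 1) hlen, List.count_cons]
        simp
        omega
      · have hpre : [c].isPrefixOf (a :: t) = false := by
          simp [List.isPrefixOf]
          exact fun h' => hac h'
        rw [if_neg (by simp [hpre])]
        rw [ih t acc hlen, List.count_cons]
        have : (a == c) = false := by simpa using fun h' => hac h'.symm
        rw [this]
        simp

lemma str_count_one (s : String) (c : Char) :
    PySem.Str.count s (String.ofList [c]) = s.toList.count c := by
  rw [PySem.Str.count_eq]
  rw [String.toList_ofList]
  show (if ([c] : List Char).isEmpty then s.toList.length + 1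
    else PySem.Chars.count.go [c] s.toList.length s.toList 0) = s.toList.count c
  rw [if_neg (by simp), count_go_one c s.toList.length s.toList 0 (le_refl _)]
  simp

-- ===== VERDICT (by name: the statement is the Claim_ definition above) =====
theorem solution_spec : Claim_equal_solution := by
  intro s _ hpre
  unfold Spec_solution solution solution_alt
  unfold Pre_solution at hpre
  rw [if_pos hpre, if_pos hpre]
  change s.toList.foldl stepA (List.replicate 52 (0 : Int)) =
    pyLetters.map (fun ch => (PySem.Str.count s (String.ofList [ch]) : Int))
  have halpha : ∀ c ∈ s.toList, PySem.Chars.isalpha c = true := by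
    have h3 := hpre.2.2
    rw [PySem.Str.strIsalpha_eq] at h3
    simp only [PySem.Chars.strIsalpha, Bool.and_eq_true, List.all_eq_true] at h3
    exact h3.2
  apply List.ext_getElem
  · simp [length_foldl_stepA, letters_length]
  · intro j hj1 hj2
    have hj : j < 52 := by
      have h4 := hj2
      simp only [List.length_map, letters_length] at h4
      exact h4
    have hrep : j < (List.replicate 52 (0 : Int)).length := by simpa using hj
    have hjlet : j < pyLetters.length := by simpa [letters_length] using hj
    have hgetD : pyLetters[j]'hjlet = pyLetters.getD j 'A' :=
      (List.getD_eq_getElem pyLetters 'A' hjlet).symm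
    have hcnt : s.toList.countP (fun c => slot c == j) =
        s.toList.count (pyLetters[j]'hjlet) := by
      rw [List.count_eq_countP]
      apply List.countP_congr
      intro c hc
      rw [hgetD]
      have hiff := slot_eq_iff c (halpha c hc) j hj
      simp only [hiff]
    calc (s.toList.foldl stepA (List.replicate 52 (0 : Int)))[j]'hj1
        = (s.toList.foldl stepA (List.replicate 52 (0 : Int))).getD j 0 :=
          (List.getD_eq_getElem _ 0 hj1).symm
      _ = (List.replicate 52 (0 : Int)).getD j 0 +
            (s.toList.countP (fun c => slot c == j) : Int) :=
          foldl_stepA_getD s.toList halpha (List.replicate 52 (0 : Int)) j hrep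
      _ = (s.toList.count (pyLetters[j]'hjlet) : Int) := by
          have hz : (List.replicate 52 (0 : Int)).getD j 0 = 0 := by
            rw [List.getD_eq_getElem?_getD, List.getElem?_replicate, if_pos hj]
            rfl
          rw [hcnt, hz, zero_add]
      _ = (pyLetters.map (fun ch => (PySem.Str.count s (String.ofList [ch]) : Int)))[j]'hj2 := by
          rw [List.getElem_map, str_count_one s (pyLetters[j]'hjlet)]
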